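-- pv_equiv track=rewrite | github.com/sihwan0Lee/algorithm_study | greedy/9.plus_minus.py | solution
-- ===== SOURCE A (Python) =====
-- def solution(absolutes, signs):
--     result = 0
--     for i in range(len(absolutes)):
--         for j in range(len(signs)):
--             if i == j:
--                 if signs[j] == True:
--                     result += absolutes[i]
--                 else:
--                     result -= absolutes[i]
--     return result
-- ===== SOURCE B (Python) =====
-- def solution(absolutes, signs):
--     pairs = list(zip(absolutes, signs))
--     total = sum(a for a, _ in pairs)
--     return total - 2 * sum(a for a, s in pairs if not (s == True))
-- ===== Notes on version B (the rewrite author's own statement) =====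
-- stated objective: faster
-- what changed: Replaces the quadratic nested index scan (every (i,j) pair tested for i==j) by two aggregate passes over zip(absolutes, signs): the full total minus twice the sum of the negatively-signed entries.
import Mathlib
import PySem

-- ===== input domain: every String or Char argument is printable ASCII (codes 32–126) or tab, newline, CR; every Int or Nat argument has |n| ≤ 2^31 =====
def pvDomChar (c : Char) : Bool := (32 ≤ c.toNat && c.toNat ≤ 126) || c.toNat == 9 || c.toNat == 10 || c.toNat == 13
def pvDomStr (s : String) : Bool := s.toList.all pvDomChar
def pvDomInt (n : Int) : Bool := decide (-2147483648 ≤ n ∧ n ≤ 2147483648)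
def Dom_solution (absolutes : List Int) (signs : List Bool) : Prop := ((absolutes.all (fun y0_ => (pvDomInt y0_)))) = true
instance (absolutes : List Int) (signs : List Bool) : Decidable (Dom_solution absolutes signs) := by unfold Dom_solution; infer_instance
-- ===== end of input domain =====

-- B replaces A's quadratic nested index scan by two aggregate passes over the zipped pairs: total minus twice the negatively-signed sum.

-- ===== PORT A =====
def solution (absolutes : List Int) (signs : List Bool) : Int :=
  let result : Int := 0
  let result :=
    (PySem.List.pyRange 0 (PySem.List.len absolutes) 1).foldl (fun result i =>
      (PySem.List.pyRange 0 (PySem.List.len signs) 1).foldl (fun result j =>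
        if i == j then
          if PySem.List.pyGetD signs j false == true then
            result + PySem.List.pyGetD absolutes i 0
          else
            result - PySem.List.pyGetD absolutes i 0
        else result) result) result
  result

-- ===== PORT B =====
def solution_alt (absolutes : List Int) (signs : List Bool) : Int :=
  let pairs := absolutes.zip signs
  let total := (pairs.map (fun p => p.1)).sum
  total - 2 * ((pairs.filter (fun p => !(p.2 == true))).map (fun p => p.1)).sum

-- ===== PRECONDITION & SPEC =====
def Spec_solution (absolutes : List Int) (signs : List Bool) (out : Int) : Prop := out = solution_alt absolutes signs
instance (absolutes : List Int) (signs : List Bool) (out : Int) : Decidable (Spec_solution absolutes signs out) := by unfold Spec_solution; infer_instance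

-- ===== CLAIM (what is proved, stated in full; the proofs are below) =====
def Claim_equal_solution : Prop := ∀ (absolutes : List Int) (signs : List Bool), Dom_solution absolutes signs → Spec_solution absolutes signs (solution absolutes signs)

-- ===== LEMMAS AND PROOFS =====

-- the inner loop over j only acts at j = i (if that index exists)
theorem pv_inner (g : Int → Int) (i : Int) (n : Nat) (r : Int) :
    (PySem.List.pyRange 0 (n : Int) 1).foldl (fun r j => if i == j then g r else r) r
      = if 0 ≤ i ∧ i < (n : Int) then g r else r := by
  induction n generalizing r with
  | zero =>
    rw [PySem.List.pyRange_one_eq_nil (by simp)]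
    have h0 : ¬ (0 ≤ i ∧ i < ((0 : Nat) : Int)) := by omega
    simp only [List.foldl_nil, if_neg h0]
  | succ n ih =>
    have h : ((n + 1 : Nat) : Int) = (n : Int) + 1 := by push_cast; ring
    rw [h, PySem.List.pyRange_one_succ_right (by positivity), List.foldl_append, ih r]
    simp only [List.foldl_cons, List.foldl_nil, beq_iff_eq]
    by_cases h1 : 0 ≤ i ∧ i < (n : Int)
    · have hne : ¬ i = (n : Int) := by omega
      have h2 : 0 ≤ i ∧ i < (n : Int) + 1 := by omega
      simp [h1, h2, hne]
    · by_cases hi : i = (n : Int)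
      · have h2 : 0 ≤ i ∧ i < (n : Int) + 1 := by omega
        simp [h1, hi, h2]
      · have h2 : ¬ (0 ≤ i ∧ i < (n : Int) + 1) := by omega
        simp [h1, hi]
        intro ha hb
        exfalso
        omega

-- A equals the signed sum over indices below both lengths
theorem pv_A_eq (absolutes : List Int) (signs : List Bool) :
    solution absolutes signs
      = ((List.range absolutes.length).map (fun (k : Nat) =>
          if (k : Int) < (signs.length : Int) then
            (if signs.getD k false then absolutes.getD k 0 else -(absolutes.getD k 0))
          else 0)).sum := by
  unfold solution
  simp only [PySem.List.len_eq]
  have hstep : (fun (result : Int) (i : Int) =>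
      (PySem.List.pyRange 0 (signs.length : Int) 1).foldl (fun result j =>
        if i == j then
          if PySem.List.pyGetD signs j false == true then
            result + PySem.List.pyGetD absolutes i 0
          else
            result - PySem.List.pyGetD absolutes i 0
        else result) result)
      = (fun (result : Int) (i : Int) =>
          result + (if 0 ≤ i ∧ i < (signs.length : Int) then
            (if PySem.List.pyGetD signs i false then PySem.List.pyGetD absolutes i 0
             else -(PySem.List.pyGetD absolutes i 0)) else 0)) := by
    funext r i
    have hj : (fun (result : Int) (j : Int) =>
        if i == j then
          if PySem.List.pyGetD signs j false == true then
            result + PySem.List.pyGetD absolutes i 0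
          else
            result - PySem.List.pyGetD absolutes i 0
        else result)
        = (fun (result : Int) (j : Int) =>
            if i == j then
              (if PySem.List.pyGetD signs i false == true then
                result + PySem.List.pyGetD absolutes i 0
              else
                result - PySem.List.pyGetD absolutes i 0)
            else result) := by
      funext res j
      by_cases h : i = j
      · subst h; rfl
      · simp [h]
    rw [hj, pv_inner (fun r =>
      if PySem.List.pyGetD signs i false == true then r + PySem.List.pyGetD absolutes i 0
      else r - PySem.List.pyGetD absolutes i 0) i signs.length r]
    split_ifs with h1 h2 <;> simp_all <;> ring
  rw [hstep, PySem.List.foldl_add]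
  rw [PySem.List.pyRange_one]
  simp only [List.map_map, zero_add]
  congr 1
  apply List.map_congr_left
  intro k hk
  simp only [Function.comp]
  by_cases hs : (k : Int) < (signs.length : Int)
  · have hcond : 0 ≤ (0 + (k : Int)) ∧ 0 + (k : Int) < (signs.length : Int) := by
      constructor <;> omega
    simp [hs, PySem.List.pyGetD_natCast, List.getD_eq_getElem?_getD]
  · have hcond : ¬ (0 ≤ (0 + (k : Int)) ∧ 0 + (k : Int) < (signs.length : Int)) := by
      omega
    simp [hcond, hs]

-- B equals the same signed sum, via the generic pair identity
theorem pv_pairs (l : List (Int × Bool)) :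
    (l.map (fun p => p.1)).sum - 2 * ((l.filter (fun p => !(p.2 == true))).map (fun p => p.1)).sum
      = (l.map (fun p => if p.2 then p.1 else -p.1)).sum := by
  have hpred : (fun (p : Int × Bool) => !(p.2 == true)) = (fun (p : Int × Bool) => !p.2) := by
    funext p
    cases p.2 <;> rfl
  rw [hpred]
  induction l with
  | nil => simp
  | cons p t ih =>
    rcases p with ⟨a, s⟩
    cases s <;> simp <;> omega

theorem pv_zip_sum (absolutes : List Int) (signs : List Bool) :
    ((List.range absolutes.length).map (fun (k : Nat) =>
        if (k : Int) < (signs.length : Int) then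
          (if signs.getD k false then absolutes.getD k 0 else -(absolutes.getD k 0))
        else 0)).sum
      = ((absolutes.zip signs).map (fun p => if p.2 then p.1 else -p.1)).sum := by
  induction absolutes generalizing signs with
  | nil => simp
  | cons a t ih =>
    cases signs with
    | nil =>
      have hz : ∀ k ∈ List.range (a :: t).length,
          (if ((k : Nat) : Int) < (([] : List Bool).length : Int) then
            (if ([] : List Bool).getD k false then (a :: t).getD k 0 else -((a :: t).getD k 0))
          else 0) = (0 : Int) := by
        intro k _
        have hneg : ¬ ((k : Int) < (([] : List Bool).length : Int)) := by simp
        simp only [if_neg hneg]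
      rw [List.map_congr_left hz]
      simp
    | cons b bs =>
      simp only [List.length_cons]
      rw [List.range_succ_eq_map]
      simp only [List.map_cons, List.map_map, List.sum_cons, List.zip_cons_cons]
      congr 1
      · have h0 : ((0 : Nat) : Int) < ((bs.length + 1 : Nat) : Int) := by
          push_cast; omega
        simp only [if_pos h0, List.getD_cons_zero]
      · refine Eq.trans (congrArg List.sum (List.map_congr_left ?_)) (ih bs)
        intro k hk
        simp only [Function.comp, List.getD_cons_succ]
        have hiff : ((k + 1 : Nat) : Int) < ((bs.length + 1 : Nat) : Int) ↔ (k : Int) < (bs.length : Int) := by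
          push_cast; omega
        rw [if_congr hiff rfl rfl]

-- ===== VERDICT (by name: the statement is the Claim_ definition above) =====
theorem solution_spec : Claim_equal_solution := by
  intro absolutes signs _
  unfold Spec_solution solution_alt
  rw [pv_A_eq, pv_zip_sum, ← pv_pairs]
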